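-- pv_equiv track=rewrite | github.com/shankarp8/knowledge_distillation | src/data_utils.py | particle_mask
-- ===== SOURCE A (Python) =====
-- def particle_mask(sentence):
--     particles = ['a', 'an', 'the', 'is', 'can']
--     masked_sentence = sentence.split()
--     span_str = None
--     for particle in particles:
--         for i, word in enumerate(masked_sentence):
--             if particle == word:
--                 span_str = word
--                 break
--         if span_str:
--             break
--     assert span_str
--     target = '<extra_id_0> ' + span_str + ' <extra_id_1>'
--     masked_sentence = ' '.join(masked_sentence).replace(' ' + span_str,
--                                                         ' <extra_id_0>', 1)
--     return masked_sentence, target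
-- ===== SOURCE B (Python) =====
-- def particle_mask(sentence):
--     particles = ['a', 'an', 'the', 'is', 'can']
--     rank = {p: i for i, p in enumerate(particles)}
--     words = sentence.split()
--     best = None
--     for w in words:
--         r = rank.get(w)
--         if r is not None and (best is None or r < best):
--             best = r
--     assert best is not None
--     span_str = particles[best]
--     target = '<extra_id_0> ' + span_str + ' <extra_id_1>'
--     masked_sentence = ' '.join(words).replace(' ' + span_str,
--                                               ' <extra_id_0>', 1)
--     return masked_sentence, target
-- ===== Notes on version B (the rewrite author's own statement) =====
-- stated objective: alternative
-- what changed: Replaces A's priority-ordered nested scan (for each particle, scan all words) by a single pass over the words keeping a running minimum rank from a precomputed rank dictionary; the masking and target construction are unchanged.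
import Mathlib
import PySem

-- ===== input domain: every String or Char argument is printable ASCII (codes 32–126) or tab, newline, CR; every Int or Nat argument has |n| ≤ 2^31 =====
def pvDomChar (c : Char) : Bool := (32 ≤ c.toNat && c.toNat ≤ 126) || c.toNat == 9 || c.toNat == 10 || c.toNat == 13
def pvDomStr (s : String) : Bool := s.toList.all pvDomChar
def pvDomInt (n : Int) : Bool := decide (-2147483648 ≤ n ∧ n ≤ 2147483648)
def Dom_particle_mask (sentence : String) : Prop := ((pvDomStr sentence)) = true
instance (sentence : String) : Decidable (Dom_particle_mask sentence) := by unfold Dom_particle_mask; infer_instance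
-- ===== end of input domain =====

-- B replaces A's priority-ordered nested scan (per particle, scan all words) by one pass over
-- the words keeping the minimum rank from a rank dictionary; masking/target are unchanged
-- (objective: alternative decomposition, same cost on these tiny particle lists).

-- ===== PORT A =====
def pmParticles : List String := ["a", "an", "the", "is", "can"]

-- str.replace(old, new, 1) — first occurrence only; PySem.Str.replace has no count, so this is
-- ported by hand: exact for the nonempty `old` both call sites pass.
def pmReplace1 (s old new : String) : String :=
  let i := PySem.Str.find s old
  if i = -1 then s
  else String.ofList (s.toList.take i.toNat ++ new.toList ++ s.toList.drop (i.toNat + old.toList.length))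

-- A's inner loop: first word equal to `particle`, break on match
def pmFindWord (particle : String) : List String → Option String
  | [] => none
  | w :: ws => if particle == w then some w else pmFindWord particle ws

-- A's outer loop: particles in priority order, break once span_str is set (span_str is a
-- nonempty particle whenever set, so Python's truthiness test is `isSome`)
def pmOuter (masked : List String) : List String → Option String
  | [] => none
  | p :: ps =>
    match pmFindWord p masked with
    | some w => some w
    | none => pmOuter masked ps

def particle_mask (sentence : String) : String × String :=
  let masked := PySem.Str.split₀ sentence
  match pmOuter masked pmParticles with
  | none => ("", "")  -- `assert span_str` raises AssertionError here; excluded by Pre_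
  | some span =>
    let target := "<extra_id_0> " ++ span ++ " <extra_id_1>"
    (pmReplace1 (PySem.Str.join " " masked) (" " ++ span) " <extra_id_0>", target)

-- ===== PORT B =====
-- rank = {p: i for i, p in enumerate(particles)}
def pmRank : PySem.Dict String Int :=
  (PySem.List.enumerate pmParticles 0).foldl (fun d p => d.insert p.2 p.1) PySem.Dict.empty

-- B's single pass: running minimum rank among words that are in `rank`
def pmBest (words : List String) : Option Int :=
  words.foldl (fun best w =>
    match pmRank.get? w with
    | none => best
    | some r =>
      match best with
      | none => some r
      | some b => if r < b then some r else best) none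

def particle_mask_alt (sentence : String) : String × String :=
  let words := PySem.Str.split₀ sentence
  match pmBest words with
  | none => ("", "")  -- `assert best is not None` raises AssertionError here; excluded by Pre_
  | some b =>
    let span := PySem.List.pyGetD pmParticles b ""  -- particles[best]; best is always 0..4
    let target := "<extra_id_0> " ++ span ++ " <extra_id_1>"
    (pmReplace1 (PySem.Str.join " " words) (" " ++ span) " <extra_id_0>", target)

-- ===== PRECONDITION & SPEC =====
-- Pre_ excludes exactly the sentences containing none of the five particle words, on which
-- Python A (and B) raise AssertionError.
def Pre_particle_mask (sentence : String) : Prop :=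
  ∃ w ∈ PySem.Str.split₀ sentence, w ∈ (["a", "an", "the", "is", "can"] : List String)
instance (sentence : String) : Decidable (Pre_particle_mask sentence) := by
  unfold Pre_particle_mask; infer_instance

def pvWitness_particle_mask : String := "the cat is a cat"

def Spec_particle_mask (sentence : String) (out : String × String) : Prop := out = particle_mask_alt sentence
instance (sentence : String) (out : String × String) : Decidable (Spec_particle_mask sentence out) := by unfold Spec_particle_mask; infer_instance

-- ===== CLAIM (what is proved, stated in full; the proofs are below) =====
def Claim_equal_particle_mask : Prop := ∀ (sentence : String), Dom_particle_mask sentence → Pre_particle_mask sentence → Spec_particle_mask sentence (particle_mask sentence)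

-- ===== LEMMAS AND PROOFS =====

-- the first particle (in priority order) present in ws, as its rank
def pmPrio (ws : List String) : Option Int :=
  if "a" ∈ ws then some 0
  else if "an" ∈ ws then some 1
  else if "the" ∈ ws then some 2
  else if "is" ∈ ws then some 3
  else if "can" ∈ ws then some 4
  else none

def pmOmin : Option Int → Option Int → Option Int
  | none, b => b
  | a, none => a
  | some x, some y => some (min x y)

lemma pmOmin_none_left (b : Option Int) : pmOmin none b = b := rfl

lemma pmOmin_assoc (a b c : Option Int) : pmOmin (pmOmin a b) c = pmOmin a (pmOmin b c) := by
  cases a <;> cases b <;> cases c <;> simp [pmOmin, min_assoc]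

lemma pmFindWord_eq (p : String) (ws : List String) :
    pmFindWord p ws = if p ∈ ws then some p else none := by
  induction ws with
  | nil => simp [pmFindWord]
  | cons w ws ih =>
    by_cases h : p = w
    · simp [pmFindWord, h]
    · simp [pmFindWord, h, ih]

lemma pmOuter_eq (ws : List String) :
    pmOuter ws pmParticles = (pmPrio ws).map (fun i => PySem.List.pyGetD pmParticles i "") := by
  simp only [pmParticles, pmOuter, pmFindWord_eq, pmPrio]
  split_ifs <;> rfl

lemma pmRank_get? (w : String) :
    pmRank.get? w =
      if w = "a" then some 0 else if w = "an" then some 1 else if w = "the" then some 2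
      else if w = "is" then some 3 else if w = "can" then some 4 else none := by
  simp only [pmRank, pmParticles, PySem.List.enumerate, PySem.Dict.empty, List.foldl]
  split_ifs with c1 c2 c3 c4 c5 <;> simp_all [PySem.Dict.get?, PySem.Dict.insert]
  exact ⟨Ne.symm c1, Ne.symm c2, Ne.symm c3, Ne.symm c4, Ne.symm c5⟩

lemma pmPrio_cons (w : String) (t : List String) :
    pmPrio (w :: t) = pmOmin (pmRank.get? w) (pmPrio t) := by
  rw [pmRank_get?]
  by_cases h1 : w = "a"
  · subst h1; simp [pmPrio, pmOmin]; split_ifs <;> simp [pmOmin]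
  · by_cases h2 : w = "an"
    · subst h2; simp [pmPrio, h1, pmOmin]; split_ifs <;> simp [pmOmin]
    · by_cases h3 : w = "the"
      · subst h3; simp [pmPrio, h1, h2, pmOmin]; split_ifs <;> simp [pmOmin]
      · by_cases h4 : w = "is"
        · subst h4; simp [pmPrio, h1, h2, h3, pmOmin]; split_ifs <;> simp [pmOmin]
        · by_cases h5 : w = "can"
          · subst h5; simp [pmPrio, h1, h2, h3, h4, pmOmin]; split_ifs <;> simp [pmOmin]
          · have g1 := Ne.symm h1; have g2 := Ne.symm h2; have g3 := Ne.symm h3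
            have g4 := Ne.symm h4; have g5 := Ne.symm h5
            simp only [pmPrio, pmOmin, List.mem_cons, g1, g2, g3, g4, g5, false_or,
              if_neg h1, if_neg h2, if_neg h3, if_neg h4, if_neg h5]

lemma pmBest_step (best : Option Int) (w : String) :
    (match pmRank.get? w with
      | none => best
      | some r =>
        match best with
        | none => some r
        | some b => if r < b then some r else best) = pmOmin best (pmRank.get? w) := by
  cases h : pmRank.get? w with
  | none => cases best <;> simp [pmOmin]
  | some r =>
    cases best with
    | none => simp [pmOmin]
    | some b =>
      by_cases hrb : r < b <;> simp [pmOmin, hrb] <;> omega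

lemma pmBest_fold (ws : List String) (acc : Option Int) :
    ws.foldl (fun best w =>
      match pmRank.get? w with
      | none => best
      | some r =>
        match best with
        | none => some r
        | some b => if r < b then some r else best) acc = pmOmin acc (pmPrio ws) := by
  induction ws generalizing acc with
  | nil => cases acc <;> simp [pmPrio, pmOmin]
  | cons w t ih =>
    rw [List.foldl_cons, ih, pmBest_step, pmPrio_cons, pmOmin_assoc]

lemma pmBest_eq (ws : List String) : pmBest ws = pmPrio ws := by
  simp only [pmBest, pmBest_fold, pmOmin_none_left]

-- ===== VERDICT (by name: the statement is the Claim_ definition above) =====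
theorem particle_mask_spec : Claim_equal_particle_mask := by
  intro sentence _ _
  unfold Spec_particle_mask particle_mask particle_mask_alt
  simp only [pmOuter_eq, pmBest_eq]
  cases h : pmPrio (PySem.Str.split₀ sentence) with
  | none => simp [h]
  | some i => simp [h]
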